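-- pv_equiv track=rewrite | github.com/kylecui/SKILL_builder | .opencode/skills/repo-skill-miner/scripts/mine_repo.py | summarize_readme
-- ===== SOURCE A (Python) =====
-- def summarize_readme(text: str) -> tuple[str, str]:
--     if not text.strip():
--         return "", ""
--
--     title = ""
--     summary = ""
--     for line in text.splitlines():
--         stripped = line.strip()
--         if not stripped:
--             continue
--         if not title and stripped.startswith("#"):
--             title = stripped.lstrip("# ").strip()
--             continue
--         if not stripped.startswith("#") and not stripped.startswith("<"):
--             summary = stripped
--             break
--     return title, summary
-- ===== SOURCE B (Python) =====
-- def summarize_readme(text: str) -> tuple[str, str]: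
--     # Locate the summary line first, then search for a title only before it.
--     lines = [line.strip() for line in text.splitlines()]
--     n = len(lines)
--     idx = next((i for i, s in enumerate(lines)
--                 if s and not s.startswith("#") and not s.startswith("<")), n)
--     summary = lines[idx] if idx < n else ""
--     title = next((t for t in (s.lstrip("# ").strip()
--                               for s in lines[:idx] if s.startswith("#")) if t), "")
--     return title, summary
-- ===== Notes on version B (the rewrite author's own statement) =====
-- stated objective: alternative
-- what changed: B first locates the index of the first summary line (the first non-blank stripped line that is neither a heading nor an HTML tag line) and then searches for the heading title only among the lines before that index, replacing A's single stateful loop that co-tracks title and summary with an early break.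
import Mathlib
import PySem

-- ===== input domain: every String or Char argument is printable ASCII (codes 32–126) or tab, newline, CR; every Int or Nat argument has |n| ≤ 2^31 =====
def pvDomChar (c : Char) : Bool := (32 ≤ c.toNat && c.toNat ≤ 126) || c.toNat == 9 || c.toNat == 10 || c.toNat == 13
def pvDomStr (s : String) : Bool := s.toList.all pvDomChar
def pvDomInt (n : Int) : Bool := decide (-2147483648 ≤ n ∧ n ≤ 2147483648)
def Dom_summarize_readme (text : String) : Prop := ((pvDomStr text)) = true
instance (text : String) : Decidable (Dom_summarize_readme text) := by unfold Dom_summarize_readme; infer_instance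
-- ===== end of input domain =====

-- B locates the first summary line first, then searches for a '#' title only among the lines before it
-- (two bounded scans instead of A's single stateful loop with an early break); objective: alternative decomposition.

-- ===== PORT A =====
-- Python's `s.lstrip("# ")` (PySem has no lstrip-with-charset): drop leading chars that are '#' or ' ' — exact.
def pvLstripHashSpace (cs : List Char) : List Char := cs.dropWhile (fun c => c == '#' || c == ' ')

-- `stripped.lstrip("# ").strip()` — shared text-level helper of both Pythons.
def pvTitleOf (stripped : List Char) : List Char := PySem.Chars.strip (pvLstripHashSpace stripped)

-- A's for-loop with `title` accumulator, `continue`s, and early `break` (the break is the non-recursive return).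
def pvLoopA : List (List Char) → List Char → List Char × List Char
  | [], title => (title, [])
  | line :: rest, title =>
    let stripped := PySem.Chars.strip line
    if stripped.isEmpty then pvLoopA rest title
    else if title.isEmpty && PySem.Chars.startswith stripped ['#'] then pvLoopA rest (pvTitleOf stripped)
    else if !PySem.Chars.startswith stripped ['#'] && !PySem.Chars.startswith stripped ['<'] then (title, stripped)
    else pvLoopA rest title

def summarize_readme (text : String) : String × String :=
  if PySem.Str.strip text = "" then ("", "")
  else
    let r := pvLoopA (PySem.Chars.splitlines text.toList) []
    (String.ofList r.1, String.ofList r.2)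

-- ===== PORT B =====
-- the condition of B's first `next(...)`: a non-blank stripped line not starting with '#' or '<'
def pvIsSummary (s : List Char) : Bool :=
  !s.isEmpty && !PySem.Chars.startswith s ['#'] && !PySem.Chars.startswith s ['<']

def summarize_readme_alt (text : String) : String × String :=
  let lines := (PySem.Chars.splitlines text.toList).map PySem.Chars.strip
  let n := lines.length
  let idx := (lines.findIdx? pvIsSummary).getD n
  let summary := if h : idx < n then lines[idx] else []
  let title := ((((lines.take idx).filter
      (fun s => PySem.Chars.startswith s ['#'])).map pvTitleOf).find? (fun t => !t.isEmpty)).getD []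
  (String.ofList title, String.ofList summary)

-- ===== PRECONDITION & SPEC =====
def Spec_summarize_readme (text : String) (out : String × String) : Prop := out = summarize_readme_alt text
instance (text : String) (out : String × String) : Decidable (Spec_summarize_readme text out) := by unfold Spec_summarize_readme; infer_instance

-- ===== CLAIM (what is proved, stated in full; the proofs are below) =====
def Claim_equal_summarize_readme : Prop := ∀ (text : String), Dom_summarize_readme text → Spec_summarize_readme text (summarize_readme text)

-- ===== LEMMAS AND PROOFS =====

-- reference recursions over the already-stripped lines (proof-only)
def pvTitleRef : List (List Char) → List Char
  | [] => []
  | s :: rest =>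
    if pvIsSummary s then []
    else if PySem.Chars.startswith s ['#'] then
      (if (pvTitleOf s).isEmpty then pvTitleRef rest else pvTitleOf s)
    else pvTitleRef rest

def pvSumRef : List (List Char) → List Char
  | [] => []
  | s :: rest => if pvIsSummary s then s else pvSumRef rest

-- A's loop computes the reference values
lemma pvLoopA_eq (ls : List (List Char)) :
    ∀ t, pvLoopA ls t =
      ((if t.isEmpty then pvTitleRef (ls.map PySem.Chars.strip) else t),
        pvSumRef (ls.map PySem.Chars.strip)) := by
  induction ls with
  | nil => intro t; simp [pvLoopA, pvTitleRef, pvSumRef]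
  | cons line rest ih =>
    intro t
    simp only [pvLoopA, List.map_cons]
    set s := PySem.Chars.strip line with hs
    by_cases hemp : s.isEmpty
    · have : pvIsSummary s = false := by simp [pvIsSummary, hemp]
      simp [hemp, ih, pvTitleRef, pvSumRef, this,
        show PySem.Chars.startswith s ['#'] = false by
          rcases s with _ | ⟨c, cs⟩ <;> simp_all [PySem.Chars.startswith]]
    · simp only [hemp, if_neg, Bool.false_eq_true, not_false_iff]
      by_cases hh : PySem.Chars.startswith s ['#']
      · have hsum : pvIsSummary s = false := by simp [pvIsSummary, hh]
        by_cases ht : t.isEmpty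
        · simp [ht, hh, ih, pvTitleRef, pvSumRef, hsum]
        · simp [ht, hh, ih, pvSumRef, hsum]
      · by_cases hlt : PySem.Chars.startswith s ['<']
        · have hsum : pvIsSummary s = false := by simp [pvIsSummary, hlt]
          simp [hh, hlt, ih, pvTitleRef, pvSumRef, hsum]
        · have hsum : pvIsSummary s = true := by simp [pvIsSummary, hemp, hh, hlt]
          by_cases ht : t.isEmpty
          · have : t = [] := by simpa [List.isEmpty_iff] using ht
            simp [hh, hlt, pvSumRef, hsum, this, pvTitleRef]
          · simp [hh, hlt, ht, pvSumRef, hsum]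

-- B's first scan (summary index, then lookup) computes the reference summary
lemma pvAlt_sum_eq (ls : List (List Char)) :
    (if h : (ls.findIdx? pvIsSummary).getD ls.length < ls.length
      then ls[(ls.findIdx? pvIsSummary).getD ls.length] else []) = pvSumRef ls := by
  induction ls with
  | nil => simp [pvSumRef]
  | cons s rest ih =>
    by_cases hsum : pvIsSummary s
    · simp [List.findIdx?_cons, hsum, pvSumRef]
    · rw [show (s :: rest).findIdx? pvIsSummary
          = Option.map (· + 1) (rest.findIdx? pvIsSummary) by
        simp [List.findIdx?_cons, hsum]]
      rcases hfind : rest.findIdx? pvIsSummary with _ | i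
      · rw [hfind] at ih
        simp only [Option.map_none, Option.getD_none, List.length_cons, lt_irrefl,
          dite_false] at ih ⊢
        simpa [pvSumRef, hsum] using ih
      · have hi : i < rest.length := (List.findIdx?_eq_some_iff_findIdx_eq.mp hfind).1
        rw [hfind] at ih
        simp only [Option.map_some, Option.getD_some, List.length_cons,
          Nat.add_lt_add_iff_right, hi, dite_true, List.getElem_cons_succ] at ih ⊢
        simpa [pvSumRef, hsum, hi] using ih

-- B's bounded second scan computes the reference title
lemma pvAlt_title_eq (ls : List (List Char)) :
    ((((ls.take ((ls.findIdx? pvIsSummary).getD ls.length)).filter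
        (fun s => PySem.Chars.startswith s ['#'])).map pvTitleOf).find?
          (fun t => !t.isEmpty)).getD [] = pvTitleRef ls := by
  induction ls with
  | nil => simp [pvTitleRef]
  | cons s rest ih =>
    by_cases hsum : pvIsSummary s
    · simp [List.findIdx?_cons, hsum, pvTitleRef]
    · have htake : ((s :: rest).take (((s :: rest).findIdx? pvIsSummary).getD (s :: rest).length))
          = s :: rest.take ((rest.findIdx? pvIsSummary).getD rest.length) := by
        rcases hfind : rest.findIdx? pvIsSummary with _ | i
        · simp [List.findIdx?_cons, hsum, hfind]
        · simp [List.findIdx?_cons, hsum, hfind]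
      rw [htake]
      by_cases hh : PySem.Chars.startswith s ['#']
      · rw [List.filter_cons_of_pos (p := fun s => PySem.Chars.startswith s ['#']) hh, List.map_cons]
        by_cases hte : (pvTitleOf s).isEmpty
        · rw [List.find?_cons_of_neg (by simp [hte]), ih]
          simp [pvTitleRef, hsum, hh, hte]
        · rw [List.find?_cons_of_pos (by simp [hte])]
          simp [pvTitleRef, hsum, hh, hte]
      · rw [List.filter_cons_of_neg (p := fun s => PySem.Chars.startswith s ['#']) (by simp [hh]), ih]
        simp [pvTitleRef, hsum, hh]

-- reduction equations of PySem.Chars.splitlines.go for the generic head cases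
lemma pvGo_cons_break (isB : Char → Bool) (c : Char) (rest cur : List Char)
    (acc : List (List Char))
    (hne : ∀ (r : List Char), c = '\x0d' → rest = '\n' :: r → False)
    (hb : isB c = true) :
    PySem.Chars.splitlines.go isB (c :: rest) cur acc
      = PySem.Chars.splitlines.go isB rest [] (cur.reverse :: acc) := by
  rw [PySem.Chars.splitlines.go.eq_def]
  split
  · rename_i heq; cases heq
  · rename_i r heq; injection heq with h1 h2; exact (hne r h1 h2).elim
  · rename_i c' rest' h; injection h with h1 h2; subst h1 h2; simp [hb]

lemma pvGo_cons_keep (isB : Char → Bool) (c : Char) (rest cur : List Char)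
    (acc : List (List Char))
    (hne : ∀ (r : List Char), c = '\x0d' → rest = '\n' :: r → False)
    (hb : ¬ isB c = true) :
    PySem.Chars.splitlines.go isB (c :: rest) cur acc
      = PySem.Chars.splitlines.go isB rest (c :: cur) acc := by
  rw [PySem.Chars.splitlines.go.eq_def]
  split
  · rename_i heq; cases heq
  · rename_i r heq; injection heq with h1 h2; exact (hne r h1 h2).elim
  · rename_i c' rest' h; injection h with h1 h2; subst h1 h2; simp [hb]

-- whitespace-only input: every line splitlines produces is whitespace-only
lemma pvGo_all (isB : Char → Bool) (s cur : List Char) (acc : List (List Char))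
    (hs : ∀ c ∈ s, PySem.Chars.isspace c) (hc : ∀ c ∈ cur, PySem.Chars.isspace c)
    (ha : ∀ l ∈ acc, ∀ c ∈ l, PySem.Chars.isspace c) :
    ∀ l ∈ PySem.Chars.splitlines.go isB s cur acc, ∀ c ∈ l, PySem.Chars.isspace c := by
  induction s, cur, acc using PySem.Chars.splitlines.go.induct (isB := isB) with
  | case1 cur acc hemp =>
    intro l hl
    rw [PySem.Chars.splitlines.go] at hl
    rw [if_pos hemp, List.mem_reverse] at hl
    exact ha l hl
  | case2 cur acc hemp =>
    intro l hl
    rw [PySem.Chars.splitlines.go] at hl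
    rw [if_neg hemp, List.mem_reverse] at hl
    rcases List.mem_cons.mp hl with h | h
    · subst h; intro c hc'; exact hc c (List.mem_reverse.mp hc')
    · exact ha l h
  | case3 rest cur acc ih =>
    rw [PySem.Chars.splitlines.go]
    refine ih (fun c h => hs c (by simp [h])) (by simp) ?_
    intro l hl
    rcases List.mem_cons.mp hl with h | h
    · subst h; intro c hc'; exact hc c (List.mem_reverse.mp hc')
    · exact ha l h
  | case4 c rest cur acc hne hb ih =>
    rw [pvGo_cons_break isB c rest cur acc hne hb]
    refine ih (fun c h => hs c (by simp [h])) (by simp) ?_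
    intro l hl
    rcases List.mem_cons.mp hl with h | h
    · subst h; intro c' hc'; exact hc c' (List.mem_reverse.mp hc')
    · exact ha l h
  | case5 c rest cur acc hne hb ih =>
    rw [pvGo_cons_keep isB c rest cur acc hne hb]
    refine ih (fun c' h => hs c' (by simp [h])) ?_ ha
    intro c' h
    rcases List.mem_cons.mp h with h1 | h1
    · subst h1; exact hs c' (by simp)
    · exact hc c' h1

lemma pvStrip_eq_nil_of_all_space (cs : List Char) (h : ∀ c ∈ cs, PySem.Chars.isspace c) :
    PySem.Chars.strip cs = [] := by
  have h1 : List.dropWhile PySem.Chars.isspace cs = [] :=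
    List.dropWhile_eq_nil_iff.mpr (fun c hc => h c hc)
  simp [PySem.Chars.strip, PySem.Chars.lstrip, PySem.Chars.rstrip, h1]

lemma pvAll_space_of_strip_nil (cs : List Char) (h : PySem.Chars.strip cs = []) :
    ∀ c ∈ cs, PySem.Chars.isspace c := by
  have hsplit := List.takeWhile_append_dropWhile (p := PySem.Chars.isspace) (l := cs)
  simp only [PySem.Chars.strip, PySem.Chars.lstrip, PySem.Chars.rstrip,
    List.reverse_eq_nil_iff, List.dropWhile_eq_nil_iff, List.mem_reverse] at h
  intro c hc
  rw [← hsplit] at hc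
  rcases List.mem_append.mp hc with h1 | h1
  · exact List.mem_takeWhile_imp h1
  · exact h c h1

-- all-blank stripped lines give ([], [])
lemma pvRefs_nil (ls : List (List Char)) (h : ∀ s ∈ ls, s = []) :
    pvTitleRef ls = [] ∧ pvSumRef ls = [] := by
  induction ls with
  | nil => simp [pvTitleRef, pvSumRef]
  | cons s rest ih =>
    have hs : s = [] := h s (by simp)
    have := ih (fun s hs' => h s (by simp [hs']))
    subst hs
    simp [pvTitleRef, pvSumRef, pvIsSummary, PySem.Chars.startswith, this]

-- B's port in terms of the reference values
lemma pvAlt_eq (text : String) :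
    summarize_readme_alt text =
      (String.ofList (pvTitleRef ((PySem.Chars.splitlines text.toList).map PySem.Chars.strip)),
        String.ofList (pvSumRef ((PySem.Chars.splitlines text.toList).map PySem.Chars.strip))) := by
  simp only [summarize_readme_alt]
  rw [pvAlt_sum_eq, pvAlt_title_eq]

-- ===== VERDICT (by name: the statement is the Claim_ definition above) =====
theorem summarize_readme_spec : Claim_equal_summarize_readme := by
  intro text _
  unfold Spec_summarize_readme
  rw [pvAlt_eq]
  simp only [summarize_readme]
  by_cases hblank : PySem.Str.strip text = ""
  · rw [if_pos hblank]
    have hnil : PySem.Chars.strip text.toList = [] := by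
      have := congrArg String.toList hblank
      simpa using this
    have hall : ∀ c ∈ text.toList, PySem.Chars.isspace c := pvAll_space_of_strip_nil _ hnil
    have hlines : ∀ s ∈ (PySem.Chars.splitlines text.toList).map PySem.Chars.strip, s = [] := by
      intro s hsmem
      rcases List.mem_map.mp hsmem with ⟨l, hl, rfl⟩
      refine pvStrip_eq_nil_of_all_space _ ?_
      exact pvGo_all _ text.toList [] [] hall (by simp) (by simp) l
        (by simpa [PySem.Chars.splitlines] using hl)
    obtain ⟨ht, hsu⟩ := pvRefs_nil _ hlines
    rw [ht, hsu]
  · rw [if_neg hblank]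
    rw [pvLoopA_eq]
    simp
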